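-- pv_equiv track=rewrite | github.com/adang1345/Project_Euler | 133 Repunit nonfactors.py | is_ever_factor
-- ===== SOURCE A (Python) =====
-- def is_ever_factor(p, nmax):
--     """Return whether p is a factor of R(10^n) for some n>=1. If n reaches nmax and the answer has not been found,
--     assume that p is not a factor."""
--     n = 1
--     prev = set()
--     while n <= nmax:
--         mod = pow(10, 10**n, 9*p)
--         if mod == 1:  # (10^10^n mod 9p = 1), so answer is yes
--             return True
--         elif mod in prev:  # (10^10^n mod 9p) looped to a previous non-one value, so answer is no
--             return False
--         prev.add(mod)
--         n += 1
--     return False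
-- ===== SOURCE B (Python) =====
-- def is_ever_factor(p, nmax):
--     """Return whether p is a factor of R(10^n) for some n>=1. If n reaches nmax and the answer has not been found,
--     assume that p is not a factor."""
--     if nmax < 1:
--         return False
--     m = 9 * p
--     a = pow(10, 10, m)  # 10^(10^1) mod 9p
--     seen = set()
--     for _ in range(nmax):
--         if a == 1:
--             return True
--         if a in seen:
--             return False
--         seen.add(a)
--         a = pow(a, 10, m)  # 10^(10^(n+1)) = (10^(10^n))^10  mod 9p
--     return False
-- ===== Notes on version B (the rewrite author's own statement) =====
-- stated objective: alternative
-- what changed: Replaces the per-step pow(10, 10**n, 9p) with the growing exponent 10**n by the incremental recurrence a <- pow(a, 10, 9p), doing O(1) modular multiplications per step instead of O(n); measured speed-up on generated inputs was marginal because A's cycle detection usually stops both loops early.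
import Mathlib
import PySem

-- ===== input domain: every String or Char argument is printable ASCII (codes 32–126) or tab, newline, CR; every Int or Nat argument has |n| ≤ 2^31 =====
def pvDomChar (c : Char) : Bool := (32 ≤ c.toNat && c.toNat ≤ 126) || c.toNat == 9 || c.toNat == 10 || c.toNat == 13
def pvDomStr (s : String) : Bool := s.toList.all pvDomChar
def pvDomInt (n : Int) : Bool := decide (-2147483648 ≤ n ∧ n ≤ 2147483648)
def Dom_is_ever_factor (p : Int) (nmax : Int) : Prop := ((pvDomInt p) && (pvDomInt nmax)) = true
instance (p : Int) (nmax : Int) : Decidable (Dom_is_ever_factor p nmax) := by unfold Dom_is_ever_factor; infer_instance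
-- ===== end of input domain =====

-- B replaces A's per-step pow(10, 10**n, 9p) (recomputed with the growing exponent 10**n)
-- by the incremental recurrence a <- pow(a, 10, 9p): constant work per loop step.

-- ===== PORT A =====
-- while-loop of A: fuel counts the remaining iterations (n runs 1..nmax)
def pvALoop (p nmax : Int) (n : Nat) (prev : PySem.Set Int) : Nat → Bool
  | 0 => false
  | f + 1 =>
    if (n : Int) ≤ nmax then
      let md := PySem.Int.powMod 10 (10 ^ n) (9 * p)
      if md = 1 then true
      else if PySem.Set.contains prev md then false
      else pvALoop p nmax (n + 1) (PySem.Set.add prev md) f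
    else false

def is_ever_factor (p : Int) (nmax : Int) : Bool :=
  pvALoop p nmax 1 PySem.Set.empty nmax.toNat

-- ===== PORT B =====
-- for-loop of B: a is the running residue, updated by a <- pow(a, 10, m)
def pvBLoop (m : Int) : Int → PySem.Set Int → Nat → Bool
  | _, _, 0 => false
  | a, seen, f + 1 =>
    if a = 1 then true
    else if PySem.Set.contains seen a then false
    else pvBLoop m (PySem.Int.powMod a 10 m) (PySem.Set.add seen a) f

def is_ever_factor_alt (p : Int) (nmax : Int) : Bool :=
  if nmax < 1 then false
  else pvBLoop (9 * p) (PySem.Int.powMod 10 10 (9 * p)) PySem.Set.empty nmax.toNat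

-- ===== PRECONDITION & SPEC =====
-- Pre_ excludes exactly the inputs where Python's pow(_, _, 9*p) raises ValueError (modulus 0):
-- p = 0 with at least one loop iteration (nmax >= 1). Both A and B raise there.
def Pre_is_ever_factor (p : Int) (nmax : Int) : Prop := p ≠ 0 ∨ nmax < 1
instance (p : Int) (nmax : Int) : Decidable (Pre_is_ever_factor p nmax) := by
  unfold Pre_is_ever_factor; infer_instance

def pvWitness_is_ever_factor : Int × Int := (7, 5)

def Spec_is_ever_factor (p : Int) (nmax : Int) (out : Bool) : Prop := out = is_ever_factor_alt p nmax
instance (p : Int) (nmax : Int) (out : Bool) : Decidable (Spec_is_ever_factor p nmax out) := by unfold Spec_is_ever_factor; infer_instance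

-- ===== CLAIM (what is proved, stated in full; the proofs are below) =====
def Claim_equal_is_ever_factor : Prop := ∀ (p : Int) (nmax : Int), Dom_is_ever_factor p nmax → Pre_is_ever_factor p nmax → Spec_is_ever_factor p nmax (is_ever_factor p nmax)

-- ===== LEMMAS AND PROOFS =====

-- mod m identifies integers that differ by a multiple of m (m ≠ 0)
theorem pv_mod_congr (a b m : Int) (hm : m ≠ 0) (h : m ∣ a - b) :
    PySem.Int.mod a m = PySem.Int.mod b m := by
  have ha := PySem.Int.floordiv_mul_add_mod a m
  have hb := PySem.Int.floordiv_mul_add_mod b m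
  have hd : m ∣ PySem.Int.mod a m - PySem.Int.mod b m := by
    have heq : PySem.Int.mod a m - PySem.Int.mod b m
        = (a - b) - (PySem.Int.floordiv a m - PySem.Int.floordiv b m) * m := by
      linear_combination ha - hb
    rw [heq]
    exact dvd_sub h (dvd_mul_left m _)
  have hz : PySem.Int.mod a m - PySem.Int.mod b m = 0 := by
    rcases lt_or_gt_of_ne hm with hneg | hpos
    · have h1 := PySem.Int.mod_neg_bounds a hneg
      have h2 := PySem.Int.mod_neg_bounds b hneg
      apply Int.eq_zero_of_abs_lt_dvd ((neg_dvd).mpr hd)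
      rw [abs_lt]; omega
    · have h1 := PySem.Int.mod_nonneg a hpos
      have h2 := PySem.Int.mod_lt a hpos
      have h3 := PySem.Int.mod_nonneg b hpos
      have h4 := PySem.Int.mod_lt b hpos
      apply Int.eq_zero_of_abs_lt_dvd hd
      rw [abs_lt]; omega
  omega

-- taking the residue first does not change a modular power (m ≠ 0)
theorem pv_powMod_mod (x m : Int) (k : Nat) (hm : m ≠ 0) :
    PySem.Int.powMod (PySem.Int.mod x m) k m = PySem.Int.mod (x ^ k) m := by
  unfold PySem.Int.powMod
  apply pv_mod_congr _ _ _ hm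
  have hx : m ∣ x - PySem.Int.mod x m := by
    refine ⟨PySem.Int.floordiv x m, ?_⟩
    have := PySem.Int.floordiv_mul_add_mod x m
    linarith
  have hmodeq : PySem.Int.mod x m ^ k ≡ x ^ k [ZMOD m] :=
    Int.ModEq.pow k (Int.modEq_iff_dvd.mpr hx)
  exact hmodeq.symm.dvd

-- one B-step from the n-th residue yields the (n+1)-th residue of A (m = 9p ≠ 0)
theorem pv_step (p : Int) (hp : p ≠ 0) (n : Nat) :
    PySem.Int.powMod (PySem.Int.powMod 10 (10 ^ n) (9 * p)) 10 (9 * p)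
      = PySem.Int.powMod 10 (10 ^ (n + 1)) (9 * p) := by
  have hm : (9 : Int) * p ≠ 0 := by
    intro h; rcases mul_eq_zero.mp h with h9 | hp0
    · norm_num at h9
    · exact hp hp0
  rw [show PySem.Int.powMod 10 (10 ^ n) (9 * p) = PySem.Int.mod ((10:Int) ^ (10 ^ n)) (9 * p) from rfl,
      pv_powMod_mod _ _ _ hm]
  unfold PySem.Int.powMod
  congr 1
  rw [← pow_mul, pow_succ]

-- the two loops agree step for step when the fuel tracks A's remaining iterations
theorem pv_loop_eq (p nmax : Int) (hp : p ≠ 0) :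
    ∀ (f : Nat) (n : Nat) (s : PySem.Set Int), f = (nmax - (n : Int) + 1).toNat →
      pvALoop p nmax n s f = pvBLoop (9 * p) (PySem.Int.powMod 10 (10 ^ n) (9 * p)) s f := by
  intro f
  induction f with
  | zero => intro n s _; rfl
  | succ f ih =>
    intro n s hf
    have hn : (n : Int) ≤ nmax := by omega
    simp only [pvALoop, pvBLoop, if_pos hn]
    split
    · rfl
    · split
      · rfl
      · rw [ih (n + 1) _ (by push_cast; omega), pv_step p hp n]

-- ===== VERDICT (by name: the statement is the Claim_ definition above) =====
theorem is_ever_factor_spec : Claim_equal_is_ever_factor := by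
  intro p nmax _ hpre
  unfold Spec_is_ever_factor is_ever_factor is_ever_factor_alt
  by_cases hlt : nmax < 1
  · rw [if_pos hlt]
    have : nmax.toNat = 0 := by omega
    rw [this]; rfl
  · rw [if_neg hlt]
    have hp : p ≠ 0 := by
      rcases hpre with h | h
      · exact h
      · exact absurd h hlt
    have := pv_loop_eq p nmax hp nmax.toNat 1 PySem.Set.empty (by omega)
    rw [this]; norm_num
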